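-- pv_equiv track=rewrite | github.com/pypi-data/pypi-mirror-396 | packages/ygg/ygg-0.1.14-py3-none-any.whl/yggdrasil/databricks/sql/engine.py | _catalog_schema_table_names
-- ===== SOURCE A (Python) =====
-- def _catalog_schema_table_names(
--     full_name: str,
-- ):
--     parts = [
--         _.strip("`") for _ in full_name.split(".")
--     ]
--
--     if len(parts) == 0:
--         return None, None, None
--     if len(parts) == 1:
--         return None, None, parts[0]
--     if len(parts) == 2:
--         return None, parts[0], parts[1]
--
--     return parts[-3], parts[-2], parts[-1]
-- ===== SOURCE B (Python) =====
-- def _catalog_schema_table_names(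
--     full_name: str,
-- ):
--     head, sep, rest = full_name.partition(".")
--     c, s, t = None, None, head.strip("`")
--     while sep:
--         head, sep, rest = rest.partition(".")
--         c, s, t = s, t, head.strip("`")
--     return c, s, t
-- ===== Notes on version B (the rewrite author's own statement) =====
-- stated objective: alternative
-- what changed: Replaces A's split-into-a-list-then-branch-on-length approach by a streaming left-to-right scan: repeatedly peel the next segment with str.partition at the dot separator and keep only a sliding window of the last three stripped segments in three variables, so no list of parts is ever built and there are no length branches.
import Mathlib
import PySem

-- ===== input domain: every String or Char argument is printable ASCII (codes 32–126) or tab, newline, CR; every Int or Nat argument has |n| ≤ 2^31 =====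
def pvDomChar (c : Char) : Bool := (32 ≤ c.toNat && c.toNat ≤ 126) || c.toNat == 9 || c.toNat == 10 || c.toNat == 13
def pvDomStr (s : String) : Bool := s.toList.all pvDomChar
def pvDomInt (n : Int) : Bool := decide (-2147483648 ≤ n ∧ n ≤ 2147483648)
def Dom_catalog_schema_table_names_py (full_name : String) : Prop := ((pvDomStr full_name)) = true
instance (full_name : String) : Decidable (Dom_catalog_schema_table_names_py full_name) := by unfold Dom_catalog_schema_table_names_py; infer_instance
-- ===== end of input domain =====

-- B replaces A's build-the-whole-parts-list-then-branch-on-length approach by a streaming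
-- scan with str.partition('.') keeping a three-variable sliding window; same behaviour.

-- ===== PORT A =====
def catalog_schema_table_names_py (full_name : String) : Option String × Option String × Option String :=
  let parts := (PySem.Chars.splitOn full_name.toList ".".toList).map
      (fun cs => String.ofList (PySem.Chars.stripChars cs "`".toList))
  if parts.length = 0 then (none, none, none)
  else if parts.length = 1 then (none, none, PySem.List.pyGet? parts 0)
  else if parts.length = 2 then (none, PySem.List.pyGet? parts 0, PySem.List.pyGet? parts 1)
  else (PySem.List.pyGet? parts (-3), PySem.List.pyGet? parts (-2), PySem.List.pyGet? parts (-1))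

-- ===== PORT B =====
-- s.partition(".") ported by hand (PySem has no partition): scan for the FIRST '.',
-- return (before, found?, after); exact for the one-character separator '.'.
def pvPartDot : List Char → List Char × Bool × List Char
  | [] => ([], false, [])
  | c :: rest =>
      if c = '.' then ([], true, rest)
      else
        let (h, f, r) := pvPartDot rest
        (c :: h, f, r)

-- p.strip("`") as in Source B
def pvStripBt (cs : List Char) : String := String.ofList (PySem.Chars.stripChars cs "`".toList)

-- the while loop of Source B: state (c, s, t), loop condition = sep truthiness; fuel is
-- only for termination (rest.length + 1 always suffices, each step consumes ≥ 1 char)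
def pvLoopB : (Option String × Option String × String) → Bool → List Char → Nat →
    Option String × Option String × String
  | st, false, _, _ => st
  | st, true, _, 0 => st
  | (_c, s, t), true, rest, fuel + 1 =>
      let (h, sp, r) := pvPartDot rest
      pvLoopB (s, some t, pvStripBt h) sp r fuel

def catalog_schema_table_names_py_alt (full_name : String) : Option String × Option String × Option String :=
  let (h, sp, rest) := pvPartDot full_name.toList
  let st := ((none : Option String), (none : Option String), pvStripBt h)
  let (c, s, t) := pvLoopB st sp rest (rest.length + 1)
  (c, s, some t)

-- ===== PRECONDITION & SPEC =====
def Spec_catalog_schema_table_names_py (full_name : String) (out : Option String × Option String × Option String) : Prop := out = catalog_schema_table_names_py_alt full_name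
instance (full_name : String) (out : Option String × Option String × Option String) : Decidable (Spec_catalog_schema_table_names_py full_name out) := by unfold Spec_catalog_schema_table_names_py; infer_instance

-- ===== CLAIM (what is proved, stated in full; the proofs are below) =====
def Claim_equal_catalog_schema_table_names_py : Prop := ∀ (full_name : String), Dom_catalog_schema_table_names_py full_name → Spec_catalog_schema_table_names_py full_name (catalog_schema_table_names_py full_name)

-- ===== LEMMAS AND PROOFS =====

-- reference splitter: split on '.' in head-first recursive form
def pvSplitDot : List Char → List (List Char)
  | [] => [[]]
  | c :: rest =>
      if c = '.' then [] :: pvSplitDot rest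
      else (pvSplitDot rest).modifyHead (c :: ·)

theorem pvSplitDot_ne_nil (cs : List Char) : pvSplitDot cs ≠ [] := by
  cases cs with
  | nil => simp [pvSplitDot]
  | cons c rest =>
      unfold pvSplitDot
      split_ifs <;> simp
      cases h : pvSplitDot rest with
      | nil => exact absurd h (pvSplitDot_ne_nil rest)
      | cons a l => simp

-- splitOn.go for sep = ['.'] computes pvSplitDot (with accumulator/current-chunk state)
theorem pv_go_eq (fuel : Nat) :
    ∀ (l cur : List Char) (acc : List (List Char)), l.length < fuel →
      PySem.Chars.splitOn.go ['.'] fuel l cur acc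
        = acc.reverse ++ (pvSplitDot l).modifyHead (cur.reverse ++ ·) := by
  induction fuel with
  | zero => intro l cur acc h; omega
  | succ n ih =>
      intro l cur acc h
      cases l with
      | nil => simp [PySem.Chars.splitOn.go, pvSplitDot]
      | cons c rest =>
          rw [PySem.Chars.splitOn.go]
          by_cases hc : c = '.'
          · have hp : List.isPrefixOf ['.'] (c :: rest) = true := by
              simp [List.isPrefixOf, hc]
            rw [if_pos hp]
            have := ih rest [] (cur.reverse :: acc) (by simp at h ⊢; omega)
            show PySem.Chars.splitOn.go ['.'] n (List.drop 1 (c :: rest)) [] (cur.reverse :: acc) = _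
            simp only [List.drop_succ_cons, List.drop_zero]
            rw [this]
            simp [pvSplitDot, hc]
            cases hsd : pvSplitDot rest with
            | nil => exact absurd hsd (pvSplitDot_ne_nil rest)
            | cons a l => simp
          · have hp : List.isPrefixOf ['.'] (c :: rest) = false := by
              simp [List.isPrefixOf]; exact fun h' => hc h'.symm
            rw [if_neg (by simp [hp])]
            have := ih rest (c :: cur) acc (by simp at h ⊢; omega)
            rw [this]
            simp [pvSplitDot, hc]
            cases hsd : pvSplitDot rest with
            | nil => exact absurd hsd (pvSplitDot_ne_nil rest)
            | cons a l => simp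

theorem pv_splitOn_eq (cs : List Char) :
    PySem.Chars.splitOn cs ['.'] = pvSplitDot cs := by
  unfold PySem.Chars.splitOn
  have := pv_go_eq (cs.length + 1) cs [] [] (by omega)
  rw [this]
  cases h : pvSplitDot cs with
  | nil => exact absurd h (pvSplitDot_ne_nil cs)
  | cons a l => simp

-- pvPartDot against pvSplitDot: first segment and the rest
theorem pv_part_spec (cs : List Char) :
    (if (pvPartDot cs).2.1 = true
      then pvSplitDot cs = (pvPartDot cs).1 :: pvSplitDot (pvPartDot cs).2.2
      else pvSplitDot cs = [(pvPartDot cs).1] ∧ (pvPartDot cs).1 = cs) := by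
  induction cs with
  | nil => simp [pvPartDot, pvSplitDot]
  | cons c rest ih =>
      by_cases hc : c = '.'
      · simp [pvPartDot, pvSplitDot, hc]
      · simp only [pvPartDot, pvSplitDot, if_neg hc]
        cases hpr : pvPartDot rest with
        | mk h fr =>
          cases fr with
          | mk f r =>
            rw [hpr] at ih
            cases f with
            | true =>
                simp at ih ⊢
                rw [ih]; simp
            | false =>
                simp at ih ⊢
                rw [ih.1]; simp [ih.2]

-- the sliding-window step of Source B as a fold step
def pvShift (st : Option String × Option String × String) (x : String) :
    Option String × Option String × String := (st.2.1, some st.2.2, x)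

-- the loop entered with sep = True folds pvShift over the segments of the remainder
theorem pv_loop_eq (fuel : Nat) :
    ∀ (rest : List Char) (c s : Option String) (t : String), rest.length < fuel →
      pvLoopB (c, s, t) true rest fuel
        = List.foldl pvShift (c, s, t) ((pvSplitDot rest).map pvStripBt) := by
  induction fuel with
  | zero => intro rest c s t h; omega
  | succ n ih =>
      intro rest c s t h
      rw [pvLoopB]
      have hps := pv_part_spec rest
      cases hpr : pvPartDot rest with
      | mk hd fr =>
        cases fr with
        | mk f r =>
          rw [hpr] at hps
          cases f with
          | false =>
              simp at hps
              simp only [pvLoopB]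
              rw [hps.1]
              simp [pvShift]
          | true =>
              simp at hps
              have hlen : r.length < n := by
                -- pvPartDot with found = true consumes at least one character
                have : hd.length + 1 + r.length = rest.length := by
                  clear hps ih h
                  induction rest generalizing hd r with
                  | nil => simp [pvPartDot] at hpr
                  | cons a as iha =>
                      by_cases ha : a = '.'
                      · simp [pvPartDot, ha] at hpr
                        rw [hpr.1, hpr.2]; simp; omega
                      · simp only [pvPartDot, if_neg ha] at hpr
                        cases hq : pvPartDot as with
                        | mk h2 fr2 =>
                          cases fr2 with
                          | mk f2 r2 =>
                            rw [hq] at hpr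
                            simp at hpr
                            obtain ⟨h1, h2', h3⟩ := hpr
                            subst h1
                            have := iha (hd := h2) (r := r) (by rw [hq, h2', h3])
                            simp; omega
                omega
              rw [hps, List.map_cons, List.foldl_cons]
              exact ih r s (some t) (pvStripBt hd) hlen

-- fold of pvShift characterised by the reverse of the segment list
theorem pv_fold_char (l : List String) :
    ∀ (c s : Option String) (t : String),
      List.foldl pvShift (c, s, t) l
        = match l.reverse with
          | [] => (c, s, t)
          | [x] => (s, some t, x)
          | x :: y :: more =>
              (match more with
               | [] => (some t, some y, x)
               | z :: _ => (some z, some y, x)) := by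
  induction l using List.reverseRecOn with
  | nil => intro c s t; simp
  | append_singleton l x ihl =>
      intro c s t
      rw [List.foldl_append, ihl]
      simp only [List.foldl_cons, List.foldl_nil, List.reverse_append, List.reverse_cons,
        List.reverse_nil, List.nil_append, List.singleton_append]
      cases hl : l.reverse with
      | nil => simp [pvShift]
      | cons a m =>
          cases m with
          | nil => simp [pvShift]
          | cons b m2 =>
              cases m2 with
              | nil => simp [pvShift]
              | cons d m3 => simp [pvShift]

-- ===== VERDICT (by name: the statement is the Claim_ definition above) =====
theorem catalog_schema_table_names_py_spec : Claim_equal_catalog_schema_table_names_py := by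
  intro full_name _
  unfold Spec_catalog_schema_table_names_py
  unfold catalog_schema_table_names_py catalog_schema_table_names_py_alt
  have hsep : (".".toList : List Char) = ['.'] := by decide
  rw [hsep, pv_splitOn_eq]
  -- B side: reduce to a fold over the full segment list
  have hps := pv_part_spec full_name.toList
  cases hpr : pvPartDot full_name.toList with
  | mk hd fr =>
    cases fr with
    | mk f rest =>
      rw [hpr] at hps
      have hB : (let st := ((none : Option String), (none : Option String), pvStripBt hd)
                 let (c, s, t) := pvLoopB st f rest (rest.length + 1)
                 ((c, s, some t) : Option String × Option String × Option String))
          = (let r := List.foldl pvShift (none, none, pvStripBt hd)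
                        ((pvSplitDot full_name.toList).map pvStripBt).tail
             (r.1, r.2.1, some r.2.2)) := by
        cases f with
        | false =>
            simp at hps
            rw [hps.1]
            simp [pvLoopB]
        | true =>
            simp at hps
            rw [hps]
            simp only [List.map_cons, List.tail_cons]
            rw [pv_loop_eq (rest.length + 1) rest none none (pvStripBt hd) (by omega)]
      refine Eq.trans ?_ hB.symm
      simp only [show (fun cs => String.ofList (PySem.Chars.stripChars cs "`".toList)) = pvStripBt from rfl]
      -- both sides now speak about qs := map pvStripBt (pvSplitDot cs), which is nonempty
      -- with head pvStripBt hd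
      have hhead : ∃ l, pvSplitDot full_name.toList = hd :: l := by
        cases f with
        | false => simp at hps; exact ⟨[], hps.1⟩
        | true => simp at hps; exact ⟨_, hps⟩
      obtain ⟨l, hl⟩ := hhead
      rw [hl]
      simp only [List.map_cons, List.tail_cons]
      rw [pv_fold_char (l.map pvStripBt) none none (pvStripBt hd)]
      -- case on the reverse of the tail of the segment list
      cases hrev : (l.map pvStripBt).reverse with
      | nil =>
          have : l.map pvStripBt = [] := by
            have := congrArg List.reverse hrev; simpa using this
          simp [this, PySem.List.pyGet?, PySem.List.pyIdx?]
      | cons x m =>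
          cases m with
          | nil =>
              have : l.map pvStripBt = [x] := by
                have := congrArg List.reverse hrev; simpa using this
              simp [this, PySem.List.pyGet?, PySem.List.pyIdx?]
          | cons y m2 =>
              -- total length ≥ 3: A takes the last-three branch
              have hql : (hd :: l).map pvStripBt = pvStripBt hd :: l.map pvStripBt := by simp
              have hrl : (pvStripBt hd :: l.map pvStripBt).reverse
                  = x :: y :: (m2 ++ [pvStripBt hd]) := by
                simp [hrev]
              have hlen : (pvStripBt hd :: l.map pvStripBt).length = m2.length + 3 := by
                have := congrArg List.length hrl; simpa using this
              set qs := pvStripBt hd :: l.map pvStripBt with hqs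
              have hlen0 : ¬ qs.length = 0 := by omega
              have hlen1' : ¬ qs.length = 1 := by omega
              have hlen2 : ¬ qs.length = 2 := by omega
              rw [if_neg hlen0, if_neg hlen1', if_neg hlen2]
              have hg : ∀ k : Nat, k < 3 → qs[qs.length - 1 - k]? = qs.reverse[k]? := by
                intro k hk
                rw [List.getElem?_reverse (by omega)]
              have h1 : qs[qs.length - 1]? = some x := by
                have := hg 0 (by omega); simpa [hrl] using this
              have h2 : qs[qs.length - 2]? = some y := by
                have := hg 1 (by omega)
                simpa [hrl, show qs.length - 1 - 1 = qs.length - 2 by omega] using this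
              have h3 : qs[qs.length - 3]? = some ((m2 ++ [pvStripBt hd])[0]?.getD x) := by
                have := hg 2 (by omega)
                rw [show qs.length - 1 - 2 = qs.length - 3 by omega] at this
                rw [this, hrl]
                cases m2 with
                | nil => simp
                | cons a b => simp
              rw [PySem.List.pyGet?_neg_ofNat qs 3 (by omega) (by omega),
                  PySem.List.pyGet?_neg_ofNat qs 2 (by omega) (by omega),
                  PySem.List.pyGet?_neg_ofNat qs 1 (by omega) (by omega),
                  h1, h2, h3]
              cases m2 with
              | nil => simp
              | cons a b => simp
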